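-- pv_equiv track=rewrite | github.com/Serfeg/Anime-Girls-BPA18-02 | Задание 2/Ширнин/Cockroaches.py | Cockroaches
-- ===== SOURCE A (Python) =====
-- def Cockroaches(room):
--     directions = ['L','D','R','U']
--     holes = ['0','1','2','3','4','5','6','7','8','9']
--     result = [0]*10
--     r = room[0]
--     for i in range(1,len(room)-1):
--         r += room[i][len(room[i])-1]
--     for i in reversed(range(len(room[0]))):
--         r += room[len(room)-1][i]
--     for i in reversed(range(1,len(room)-1)):
--         r += room[i][0]
--     r += r
--     r = r[::-1]
--     for i in range(len(room)):
--         for j in range(len(room[i])):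
--             pos = 0
--             if room[i][j] in directions:
--                 if room[i][j] == 'L':
--                     pos = i-1
--                 elif room[i][j] == 'D':
--                     pos = len(room)+j-2
--                 elif room[i][j] == 'R':
--                     pos = 2*len(room)+len(room[i])-i-4
--                 elif room[i][j] == 'U':
--                     pos = 2*len(room)+2*len(room[i])-j-5
--                 for k in range(pos,len(r)):
--                     if r[k] in holes:
--                         result[int(r[k])] += 1
--                         break
--     return(result)
-- ===== SOURCE B (Python) =====
-- def Cockroaches(room):
--     n = len(room)
--     # perimeter, clockwise, same chunks as the task describes
--     top = room[0]
--     right = ''.join(row[-1] for row in room[1:n-1])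
--     bottom = ''.join(reversed(room[n-1][:len(room[0])]))
--     left = ''.join(row[0] for row in reversed(room[1:n-1]))
--     r = ((top + right + bottom + left) * 2)[::-1]
--     m = len(r)
--     # one backward pass: nxt[k] = value of the first hole digit at index >= k (None if none)
--     nxt = [None] * (m + 1)
--     for k in range(m - 1, -1, -1):
--         nxt[k] = int(r[k]) if r[k].isdigit() else nxt[k + 1]
--     def hole(pos):
--         # pos may be -1 (Python-negative index on r): check r[-1] first, then continue from 0
--         if pos == -1:
--             return int(r[-1]) if r[-1].isdigit() else nxt[0]
--         return nxt[pos] if pos < m else None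
--     result = [0] * 10
--     for i, row in enumerate(room):
--         for j, c in enumerate(row):
--             if c == 'L':
--                 d = hole(i - 1)
--             elif c == 'D':
--                 d = hole(n + j - 2)
--             elif c == 'R':
--                 d = hole(2 * n + len(row) - i - 4)
--             elif c == 'U':
--                 d = hole(2 * n + 2 * len(row) - j - 5)
--             else:
--                 continue
--             if d is not None:
--                 result[d] += 1
--     return result
-- ===== Notes on version B (the rewrite author's own statement) =====
-- stated objective: alternative
-- what changed: B precomputes a next-hole array over the reversed doubled perimeter string in one backward pass and builds the perimeter with slices/joins, so each cockroach is routed by an O(1) array lookup instead of A's per-cockroach linear scan of the perimeter.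
import Mathlib
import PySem

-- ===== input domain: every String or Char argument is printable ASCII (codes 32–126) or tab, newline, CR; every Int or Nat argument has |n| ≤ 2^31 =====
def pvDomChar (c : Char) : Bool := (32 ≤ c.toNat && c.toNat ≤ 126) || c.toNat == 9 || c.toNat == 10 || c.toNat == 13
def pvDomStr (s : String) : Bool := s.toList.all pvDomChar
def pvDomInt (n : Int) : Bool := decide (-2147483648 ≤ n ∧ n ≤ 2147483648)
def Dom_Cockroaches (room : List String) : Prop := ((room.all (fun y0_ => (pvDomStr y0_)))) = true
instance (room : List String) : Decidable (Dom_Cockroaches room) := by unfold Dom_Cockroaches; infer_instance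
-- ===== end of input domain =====

-- B replaces A's per-cockroach linear scan of the perimeter string with a next-hole array
-- precomputed in one backward pass (an O(1) lookup per cockroach; perimeter built by slices/joins).


-- helpers shared by both ports (both Pythons test the same digit set and do result[d] += 1)
def pvIsHole (c : Char) : Bool := '0' ≤ c && c ≤ '9'      -- `c in holes` / `c.isdigit()` on digits
def pvDigitVal (c : Char) : Int := (c.toNat : Int) - 48   -- int(c) for a single digit character
def pvBump (res : List Int) (d : Int) : List Int :=       -- result[d] += 1
  PySem.List.pySetD res d (PySem.List.pyGetD res d 0 + 1)

-- ===== PORT A =====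
-- A's perimeter string r before doubling: built character by character by A's three `+=` loops
def pvPerimA (rm : List (List Char)) : List Char :=
  let n : Nat := rm.length
  let r0 := PySem.List.pyGetD rm 0 []                      -- r = room[0]
  let r1 := (PySem.List.pyRange 1 ((n : Int) - 1)).foldl (fun acc i =>
      let row := PySem.List.pyGetD rm i []
      acc ++ [PySem.List.pyGetD row ((row.length : Int) - 1) ' ']) r0
  let r2 := ((PySem.List.pyRange 0 ((r0.length : Int))).reverse).foldl (fun acc i =>
      acc ++ [PySem.List.pyGetD (PySem.List.pyGetD rm ((n : Int) - 1) []) i ' ']) r1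
  ((PySem.List.pyRange 1 ((n : Int) - 1)).reverse).foldl (fun acc i =>
      acc ++ [PySem.List.pyGetD (PySem.List.pyGetD rm i []) 0 ' ']) r2

-- inner loop of A: `for k in range(pos, len(r)): if r[k] in holes: result[int(r[k])] += 1; break`
def pvScan (rr : List Char) (pos : Int) : Option Int :=
  match (PySem.List.pyRange pos (rr.length : Int)).find?
          (fun k => pvIsHole (PySem.List.pyGetD rr k ' ')) with
  | some k => some (pvDigitVal (PySem.List.pyGetD rr k ' '))
  | none => none

def Cockroaches (room : List String) : List Int :=
  let rm : List (List Char) := room.map String.toList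
  let n : Nat := rm.length
  let r4 := pvPerimA rm ++ pvPerimA rm                     -- r += r
  let rr := (PySem.List.slice? r4 none none (-1)).getD []  -- r = r[::-1]
  let result : List Int := List.replicate 10 0
  (PySem.List.pyRange 0 (n : Int)).foldl (fun res i =>
    let row := PySem.List.pyGetD rm i []
    (PySem.List.pyRange 0 ((row.length : Int))).foldl (fun res j =>
      let c := PySem.List.pyGetD row j ' '
      if c = 'L' ∨ c = 'D' ∨ c = 'R' ∨ c = 'U' then
        let pos : Int :=
          if c = 'L' then i - 1
          else if c = 'D' then (n : Int) + j - 2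
          else if c = 'R' then 2 * (n : Int) + (row.length : Int) - i - 4
          else 2 * (n : Int) + 2 * (row.length : Int) - j - 5
        match pvScan rr pos with
        | some d => pvBump res d
        | none => res
      else res) res) result

-- ===== PORT B =====
-- B's perimeter: the same four sides assembled by slices and joins
def pvPerimB (rm : List (List Char)) : List Char :=
  let n : Nat := rm.length
  let top := PySem.List.pyGetD rm 0 []                                   -- room[0]
  let right := (PySem.List.slice rm (some 1) (some ((n : Int) - 1))).map -- row[-1] for row in room[1:n-1]
      (fun row => PySem.List.pyGetD row (-1) ' ')
  let bottom := (PySem.List.slice (PySem.List.pyGetD rm (-1) [])         -- reversed(room[n-1][:len(room[0])])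
      none (some ((top.length : Int)))).reverse
  let left := ((PySem.List.slice rm (some 1) (some ((n : Int) - 1))).reverse).map
      (fun row => PySem.List.pyGetD row 0 ' ')                           -- row[0] for row in reversed(room[1:n-1])
  top ++ right ++ bottom ++ left

-- one backward pass over r: nxt[k] = digit of the first hole at index ≥ k (none if there is none)
def pvBuildNxt : List Char → List (Option Int)
  | [] => [none]
  | c :: t =>
      let rest := pvBuildNxt t
      (if pvIsHole c then some (pvDigitVal c) else rest.headD none) :: rest

-- B's `hole(pos)`: O(1) lookup; pos = -1 indexes r[-1] first, then continues from 0
def pvHole (rr : List Char) (nxt : List (Option Int)) (pos : Int) : Option Int :=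
  if pos = -1 then
    let c := PySem.List.pyGetD rr (-1) ' '
    if pvIsHole c then some (pvDigitVal c) else nxt.headD none
  else if pos < (rr.length : Int) then nxt.getD pos.toNat none else none

def Cockroaches_alt (room : List String) : List Int :=
  let rm : List (List Char) := room.map String.toList
  let n : Nat := rm.length
  let per := pvPerimB rm
  let rr := (PySem.List.slice? (per ++ per) none none (-1)).getD []      -- ((…)*2)[::-1]
  let nxt := pvBuildNxt rr
  let result : List Int := List.replicate 10 0
  (PySem.List.enumerate rm).foldl (fun res p =>
    (PySem.List.enumerate p.2).foldl (fun res q =>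
      let d? : Option (Option Int) :=
        if q.2 = 'L' then some (pvHole rr nxt (p.1 - 1))
        else if q.2 = 'D' then some (pvHole rr nxt ((n : Int) + q.1 - 2))
        else if q.2 = 'R' then some (pvHole rr nxt (2 * (n : Int) + (p.2.length : Int) - p.1 - 4))
        else if q.2 = 'U' then some (pvHole rr nxt (2 * (n : Int) + 2 * (p.2.length : Int) - q.1 - 5))
        else none                                                        -- `continue`
      match d? with
      | some (some d) => pvBump res d
      | _ => res) res) result

-- ===== PRECONDITION & SPEC =====
-- Pre_ excludes exactly the inputs where A raises IndexError: an empty room (room[0]),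
-- an empty middle row (room[i][-1] / room[i][0]), or a last row shorter than the first
-- (room[-1][i] for i < len(room[0])).
def Pre_Cockroaches (room : List String) : Prop :=
  room ≠ [] ∧
  (((room.drop 1).dropLast).all (fun s => !s.toList.isEmpty)) = true ∧
  (room.headD "").toList.length ≤ ((room.getLast?.getD "")).toList.length
instance (room : List String) : Decidable (Pre_Cockroaches room) := by
  unfold Pre_Cockroaches; infer_instance

def pvWitness_Cockroaches : List String := ["L1", "2R"]

def Spec_Cockroaches (room : List String) (out : List Int) : Prop := out = Cockroaches_alt room
instance (room : List String) (out : List Int) : Decidable (Spec_Cockroaches room out) := by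
  unfold Spec_Cockroaches; infer_instance

-- ===== CLAIM (what is proved, stated in full; the proofs are below) =====
def Claim_equal_Cockroaches : Prop :=
  ∀ (room : List String), Dom_Cockroaches room → Pre_Cockroaches room →
    Spec_Cockroaches room (Cockroaches room)

-- ===== LEMMAS AND PROOFS =====

-- A's len(row)-1 index coincides with B's row[-1] (both are -1 when the row is empty)
theorem pvGetD_len_sub_one {α : Type} (row : List α) (d : α) :
    PySem.List.pyGetD row ((row.length : Int) - 1) d = PySem.List.pyGetD row (-1) d := by
  rcases eq_or_ne row [] with h | h
  · subst h; norm_num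
  · have hlen : 0 < row.length := List.length_pos_of_ne_nil h
    rw [PySem.List.pyGetD_neg_one row d h,
        PySem.List.pyGetD_eq_getElem row d (by omega) (by omega),
        List.getLast_eq_getElem]
    congr 1
    omega

-- `[xs[i] for i in range(a, b)]` is `xs[a:b]` (for b within range)
theorem map_pyGetD_range_take {α : Type} (xs : List α) (d : α) (a b : Nat) (h : b ≤ xs.length) :
    (PySem.List.pyRange (a : Int) (b : Int)).map (fun i => PySem.List.pyGetD xs i d)
      = (xs.drop a).take (b - a) := by
  rcases le_or_gt a b with hab | hab
  · have hsplit := PySem.List.pyRange_one_append (a : Int) (b : Int) (xs.length : Int)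
      (by exact_mod_cast hab) (by exact_mod_cast h)
    have hfull := PySem.List.map_pyGetD_pyRange' xs d (a := (a : Int)) (by positivity)
    have hb := PySem.List.map_pyGetD_pyRange' xs d (a := (b : Int)) (by positivity)
    rw [hsplit, List.map_append, hb] at hfull
    simp only [Int.toNat_natCast] at hfull
    apply List.append_cancel_right (bs := xs.drop b)
    rw [hfull]
    have : xs.drop b = (xs.drop a).drop (b - a) := by
      rw [List.drop_drop]; congr 1; omega
    rw [this, List.take_append_drop]
  · rw [PySem.List.pyRange_one_eq_nil (by exact_mod_cast hab.le)]
    have : b - a = 0 := by omega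
    simp [this]

theorem map_comp_pyGetD_range_take {α β : Type} (xs : List α) (d : α) (g : α → β) (a b : Nat)
    (h : b ≤ xs.length) :
    (PySem.List.pyRange (a : Int) (b : Int)).map (fun i => g (PySem.List.pyGetD xs i d))
      = ((xs.drop a).take (b - a)).map g := by
  rw [← map_pyGetD_range_take xs d a b h, List.map_map]
  rfl

-- A's `+=` loops build exactly B's four slices
theorem pvPerim_eq (rm : List (List Char)) (hne : rm ≠ [])
    (hlen : (PySem.List.pyGetD rm 0 []).length ≤ (PySem.List.pyGetD rm (-1) []).length) :
    pvPerimA rm = pvPerimB rm := by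
  have hn : 0 < rm.length := List.length_pos_of_ne_nil hne
  unfold pvPerimA pvPerimB
  simp only [PySem.List.foldl_append_singleton_eq_map, List.map_reverse]
  -- the trailing loop over room[-1] reads the same row B slices
  rw [pvGetD_len_sub_one rm []]
  -- right side: characters room[i][-1] for i in range(1, n-1)
  have hright := map_comp_pyGetD_range_take rm []
    (fun row => PySem.List.pyGetD row ((row.length : Int) - 1) ' ') 1 (rm.length - 1) (by omega)
  -- left side: characters room[i][0] for i in range(1, n-1)
  have hleft := map_comp_pyGetD_range_take rm []
    (fun row => PySem.List.pyGetD row 0 ' ') 1 (rm.length - 1) (by omega)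
  -- bottom: room[-1][i] for i in range(len(room[0]))
  have hbot := map_pyGetD_range_take (PySem.List.pyGetD rm (-1) []) ' ' 0
    (PySem.List.pyGetD rm 0 []).length hlen
  have hc1 : ((1 : Nat) : Int) = (1 : Int) := by norm_num
  have hc0 : ((0 : Nat) : Int) = (0 : Int) := by norm_num
  have hcn : ((rm.length - 1 : Nat) : Int) = (rm.length : Int) - 1 := by omega
  rw [hc1, hcn] at hright hleft
  rw [hc0] at hbot
  rw [hright, hleft, hbot]
  -- B's slices
  have hsl := PySem.List.slice_natCast rm 1 (rm.length - 1)
  rw [hc1, hcn] at hsl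
  rw [hsl, PySem.List.slice_to_natCast]
  -- identical element functions on the right chunk (row[len(row)-1] = row[-1])
  have hfun : (fun row => PySem.List.pyGetD row ((row.length : Int) - 1) ' ')
      = (fun row : List Char => PySem.List.pyGetD row (-1) ' ') :=
    funext fun row => pvGetD_len_sub_one row ' '
  rw [hfun]
  simp [List.append_assoc]

theorem headD_eq_getD_zero {α : Type} (l : List α) (d : α) : l.headD d = l.getD 0 d := by
  cases l <;> rfl

-- pvBuildNxt computes the first hole digit of every suffix
theorem pvBuildNxt_getD (rr : List Char) (p : Nat) :
    (pvBuildNxt rr).getD p none = ((rr.drop p).find? pvIsHole).map pvDigitVal := by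
  induction rr generalizing p with
  | nil => cases p <;> simp [pvBuildNxt]
  | cons c t ih =>
    cases p with
    | zero =>
      by_cases hc : pvIsHole c
      · simp [pvBuildNxt, hc]
      · simp only [pvBuildNxt, List.drop_zero, List.getD_cons_zero, if_neg hc]
        rw [headD_eq_getD_zero, ih 0, List.find?_cons_of_neg (by simpa using hc)]
        simp
    | succ p =>
      simp only [pvBuildNxt, List.getD_cons_succ, List.drop_succ_cons]
      exact ih p

-- A's forward scan from a Nat start, as the first hole of the suffix
theorem pvScan_natCast (rr : List Char) (p : Nat) :
    ((PySem.List.pyRange (p : Int) (rr.length : Int)).find?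
        (fun k => pvIsHole (PySem.List.pyGetD rr k ' '))).map
      (fun k => pvDigitVal (PySem.List.pyGetD rr k ' '))
      = ((rr.drop p).find? pvIsHole).map pvDigitVal := by
  generalize hk : rr.length - p = k
  induction k generalizing p with
  | zero =>
    have hle : rr.length ≤ p := by omega
    rw [PySem.List.pyRange_one_eq_nil (by exact_mod_cast hle), List.drop_eq_nil_of_le hle]
    simp
  | succ k ih =>
    have hp : p < rr.length := by omega
    have hget : PySem.List.pyGetD rr (p : Int) ' ' = rr[p] :=
      PySem.List.pyGetD_eq_getElem rr ' ' (by positivity) (by exact_mod_cast hp)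
    have hdrop : rr.drop p = rr[p] :: rr.drop (p + 1) := List.drop_eq_getElem_cons hp
    rw [PySem.List.pyRange_one_cons (by exact_mod_cast hp), hdrop]
    by_cases hc : pvIsHole rr[p]
    · rw [List.find?_cons_of_pos (by simpa [hget] using hc),
          List.find?_cons_of_pos (by simpa using hc)]
      simp [hget]
    · rw [List.find?_cons_of_neg (by simpa [hget] using hc),
          List.find?_cons_of_neg (by simpa using hc)]
      have : ((p : Int) + 1) = ((p + 1 : Nat) : Int) := by push_cast; ring
      rw [this, ih (p + 1) (by omega)]

theorem pvScan_eq_map (rr : List Char) (pos : Int) :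
    pvScan rr pos = ((PySem.List.pyRange pos (rr.length : Int)).find?
        (fun k => pvIsHole (PySem.List.pyGetD rr k ' '))).map
      (fun k => pvDigitVal (PySem.List.pyGetD rr k ' ')) := by
  unfold pvScan
  rcases (PySem.List.pyRange pos (rr.length : Int)).find?
      (fun k => pvIsHole (PySem.List.pyGetD rr k ' ')) with _ | k <;> rfl

-- the central exchange: A's linear scan equals B's precomputed-array lookup
theorem pvScan_eq_pvHole (rr : List Char) (pos : Int) (h : -1 ≤ pos) :
    pvScan rr pos = pvHole rr (pvBuildNxt rr) pos := by
  rcases eq_or_lt_of_le h with hneg | hpos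
  · have hpos : pos = -1 := hneg.symm
    subst hpos
    rcases eq_or_ne rr [] with hnil | hne
    · subst hnil; decide
    · have hlen : 0 < rr.length := List.length_pos_of_ne_nil hne
      rw [pvScan_eq_map, PySem.List.pyRange_one_cons (by omega : (-1 : Int) < (rr.length : Int))]
      by_cases hc : pvIsHole (PySem.List.pyGetD rr (-1) ' ')
      · rw [List.find?_cons_of_pos (by simpa using hc)]
        simp [pvHole, hc]
      · rw [List.find?_cons_of_neg (by simpa using hc)]
        have h0 := pvScan_natCast rr 0
        rw [Nat.cast_zero] at h0
        rw [show (-1 : Int) + 1 = 0 by ring, h0, List.drop_zero]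
        simp only [pvHole, if_neg hc]
        rw [headD_eq_getD_zero, pvBuildNxt_getD]
        simp
  · have h0 : 0 ≤ pos := by omega
    have hcast : ((pos.toNat : Nat) : Int) = pos := Int.toNat_of_nonneg h0
    have hmain := pvScan_natCast rr pos.toNat
    rw [hcast] at hmain
    rw [pvScan_eq_map, hmain]
    unfold pvHole
    rw [if_neg (by omega)]
    by_cases hlt : pos < (rr.length : Int)
    · rw [if_pos hlt, pvBuildNxt_getD]
    · rw [if_neg hlt, List.drop_eq_nil_of_le (by omega)]
      simp

-- ===== VERDICT (by name: the statement is the Claim_ definition above) =====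
theorem Cockroaches_spec : Claim_equal_Cockroaches := by
  intro room _ hpre
  obtain ⟨h1, h2, h3⟩ := hpre
  show Cockroaches room = Cockroaches_alt room
  unfold Cockroaches Cockroaches_alt
  have hne : room.map String.toList ≠ [] := by simpa using h1
  have hlen : (PySem.List.pyGetD (room.map String.toList) 0 []).length
      ≤ (PySem.List.pyGetD (room.map String.toList) (-1) []).length := by
    rcases room with _ | ⟨s, t⟩
    · cases h1 rfl
    · simp only [List.map_cons, PySem.List.pyGetD_zero_cons]
      have hlast : PySem.List.pyGetD (s.toList :: List.map String.toList t) (-1) []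
          = ((s :: t).getLast (by simp)).toList := by
        rw [← List.map_cons, PySem.List.pyGetD_neg_one _ _ (by simp), List.getLast_map (by simp)]
      rw [hlast]
      rw [List.getLast?_eq_some_getLast (l := s :: t) (by simp)] at h3
      simpa using h3
  dsimp only
  rw [pvPerim_eq _ hne hlen]
  rw [PySem.List.enumerate_eq_map_pyRange (room.map String.toList) [], List.foldl_map,
      PySem.List.len_eq]
  apply PySem.List.foldl_congr_mem
  intro res i hi
  obtain ⟨hi0, hin⟩ := PySem.List.mem_pyRange_one.mp hi
  dsimp only
  rw [PySem.List.enumerate_eq_map_pyRange (PySem.List.pyGetD (room.map String.toList) i []) ' ',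
      List.foldl_map, PySem.List.len_eq]
  apply PySem.List.foldl_congr_mem
  intro res2 j hj
  obtain ⟨hj0, hjL⟩ := PySem.List.mem_pyRange_one.mp hj
  dsimp only
  set rr := (PySem.List.slice? (pvPerimB (room.map String.toList) ++ pvPerimB (room.map String.toList))
      none none (-1)).getD [] with hrr
  set row := PySem.List.pyGetD (room.map String.toList) i [] with hrow
  set c := PySem.List.pyGetD row j ' ' with hcdef
  have hL1 : (1 : Int) ≤ (row.length : Int) := by omega
  have hn1 : (1 : Int) ≤ ((room.map String.toList).length : Int) := by omega
  by_cases hL : c = 'L'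
  · rw [hL]
    rw [if_pos (by decide : ('L' : Char) = 'L' ∨ 'L' = 'D' ∨ 'L' = 'R' ∨ 'L' = 'U'),
        if_pos (rfl : ('L' : Char) = 'L'), if_pos (rfl : ('L' : Char) = 'L'),
        ← pvScan_eq_pvHole rr (i - 1) (by omega)]
    cases pvScan rr (i - 1) <;> rfl
  · by_cases hD : c = 'D'
    · rw [hD]
      rw [if_pos (by decide : ('D' : Char) = 'L' ∨ 'D' = 'D' ∨ 'D' = 'R' ∨ 'D' = 'U'),
          if_neg (by decide : ¬('D' : Char) = 'L'), if_neg (by decide : ¬('D' : Char) = 'L'),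
          if_pos (rfl : ('D' : Char) = 'D'), if_pos (rfl : ('D' : Char) = 'D'),
          ← pvScan_eq_pvHole rr _ (by omega)]
      cases pvScan rr (((room.map String.toList).length : Int) + j - 2) <;> rfl
    · by_cases hR : c = 'R'
      · rw [hR]
        rw [if_pos (by decide : ('R' : Char) = 'L' ∨ 'R' = 'D' ∨ 'R' = 'R' ∨ 'R' = 'U'),
            if_neg (by decide : ¬('R' : Char) = 'L'), if_neg (by decide : ¬('R' : Char) = 'L'),
            if_neg (by decide : ¬('R' : Char) = 'D'), if_neg (by decide : ¬('R' : Char) = 'D'),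
            if_pos (rfl : ('R' : Char) = 'R'), if_pos (rfl : ('R' : Char) = 'R'),
            ← pvScan_eq_pvHole rr _ (by omega)]
        cases pvScan rr (2 * ((room.map String.toList).length : Int) + (row.length : Int) - i - 4) <;> rfl
      · by_cases hU : c = 'U'
        · rw [hU]
          rw [if_pos (by decide : ('U' : Char) = 'L' ∨ 'U' = 'D' ∨ 'U' = 'R' ∨ 'U' = 'U'),
              if_neg (by decide : ¬('U' : Char) = 'L'), if_neg (by decide : ¬('U' : Char) = 'L'),
              if_neg (by decide : ¬('U' : Char) = 'D'), if_neg (by decide : ¬('U' : Char) = 'D'),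
              if_neg (by decide : ¬('U' : Char) = 'R'), if_neg (by decide : ¬('U' : Char) = 'R'),
              if_pos (rfl : ('U' : Char) = 'U'),
              ← pvScan_eq_pvHole rr _ (by omega)]
          cases pvScan rr (2 * ((room.map String.toList).length : Int) + 2 * (row.length : Int) - j - 5) <;> rfl
        · rw [if_neg (by simp [hL, hD, hR, hU]), if_neg hL, if_neg hD, if_neg hR, if_neg hU]
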